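-- pv_equiv track=rewrite | github.com/pradykst/AoC_solution | Day6_1.py | find_problem_segments
-- ===== SOURCE A (Python) =====
-- def find_problem_segments(grid):
--     rows=len(grid)
--     cols=len(grid[0]) if rows else 0
--
--     is_blank_col=[]
--
--     for c in range(cols):
--         blank=True
--
--         for r in range(rows):
--             if grid[r][c]!=" ":
--                 blank=False
--                 break
--         is_blank_col.append(blank)
--
--
--     segments=[]
--
--     c=0
--
--     while c<cols:
--         if is_blank_col[c]:
--             c+=1
--             continue
--         start=c
--         while c<cols and not is_blank_col[c]:
--             c+=1
--         end=c-1
--         segments.append((start,end))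
--
--     return segments
-- ===== SOURCE B (Python) =====
-- def find_problem_segments(grid):
--     cols = len(grid[0]) if grid else 0
--     segments = []
--     start = None
--     for c in range(cols):
--         blank = all(row[c] == " " for row in grid)
--         if not blank:
--             if start is None:
--                 start = c
--         elif start is not None:
--             segments.append((start, c - 1))
--             start = None
--     if start is not None:
--         segments.append((start, cols - 1))
--     return segments
-- ===== Notes on version B (the rewrite author's own statement) =====
-- stated objective: simpler
-- what changed: Single pass over columns carrying an optional open-segment start (flushed at the end), instead of first materialising a blank-column boolean list and then grouping it with nested while loops; the per-column blank test is an all() generator with the same short-circuit order.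
import Mathlib
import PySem

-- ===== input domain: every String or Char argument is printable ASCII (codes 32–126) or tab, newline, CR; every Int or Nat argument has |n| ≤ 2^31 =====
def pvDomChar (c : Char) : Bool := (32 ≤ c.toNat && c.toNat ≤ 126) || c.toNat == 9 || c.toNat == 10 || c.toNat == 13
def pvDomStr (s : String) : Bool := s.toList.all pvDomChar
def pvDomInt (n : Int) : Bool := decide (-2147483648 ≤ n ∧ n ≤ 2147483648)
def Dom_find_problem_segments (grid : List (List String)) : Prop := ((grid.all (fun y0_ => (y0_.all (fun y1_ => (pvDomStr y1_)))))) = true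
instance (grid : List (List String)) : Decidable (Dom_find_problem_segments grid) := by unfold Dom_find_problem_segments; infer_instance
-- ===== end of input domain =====

-- B replaces A's two phases (blank-column list, then while-loop grouping) by one pass over
-- columns with an optional open-segment start; same cost, shorter and plainer code.

-- ===== PORT A =====
-- inner loop 'for r in range(rows): if grid[r][c] != " ": blank=False; break',
-- transcribed over the index list List.range rows; out-of-range access (Python IndexError)
-- is excluded by Pre_ and defaulted to " " here.
def pvBlankA (grid : List (List String)) (c : Nat) : List Nat → Bool
  | [] => true
  | r :: rs => if ((grid.getD r []).getD c " ") ≠ " " then false else pvBlankA grid c rs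

-- inner 'while c < cols and not is_blank_col[c]: c += 1' on the remaining suffix of
-- is_blank_col, returning the new c and the remaining suffix
def pvSkipA : List Bool → Nat → Nat × List Bool
  | [], c => (c, [])
  | false :: rest, c => pvSkipA rest (c + 1)
  | true :: rest, c => (c, true :: rest)

theorem pvSkipA_len : ∀ (bs : List Bool) (c : Nat), (pvSkipA bs c).2.length ≤ bs.length := by
  intro bs
  induction bs with
  | nil => intro c; simp [pvSkipA]
  | cons b rest ih =>
      intro c
      cases b
      · simpa [pvSkipA] using Nat.le_trans (ih (c + 1)) (Nat.le_succ _)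
      · simp [pvSkipA]

-- outer 'while c < cols' over the suffix of is_blank_col starting at index c
def pvWhileA : List Bool → Nat → List (Int × Int)
  | [], _ => []
  | true :: rest, c => pvWhileA rest (c + 1)
  | false :: rest, c =>
      let p := pvSkipA rest (c + 1)
      ((c : Int), (p.1 : Int) - 1) :: pvWhileA p.2 p.1
  termination_by bs _ => bs.length
  decreasing_by
    all_goals simp
    exact pvSkipA_len rest (c + 1)

def find_problem_segments (grid : List (List String)) : List (Int × Int) :=
  let rows := grid.length
  let cols := if rows ≠ 0 then (grid.headD []).length else 0
  let is_blank_col := (List.range cols).map (fun c => pvBlankA grid c (List.range rows))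
  pvWhileA is_blank_col 0

-- ===== PORT B =====
-- blank = all(row[c] == " " for row in grid): short-circuiting conjunction over the rows
def pvBlankB (c : Nat) : List (List String) → Bool
  | [] => true
  | row :: rest => (row.getD c " ") == " " && pvBlankB c rest

-- one fold over the columns; state = (segments so far, optional start of the open segment)
def pvStepB (grid : List (List String)) (st : List (Int × Int) × Option Nat) (c : Nat) :
    List (Int × Int) × Option Nat :=
  if ¬ pvBlankB c grid then
    match st.2 with
    | none => (st.1, some c)
    | some _ => st
  else
    match st.2 with
    | some s => (st.1 ++ [((s : Int), (c : Int) - 1)], none)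
    | none => st

def find_problem_segments_alt (grid : List (List String)) : List (Int × Int) :=
  let cols := if grid ≠ [] then (grid.headD []).length else 0
  let st := (List.range cols).foldl (pvStepB grid) ([], none)
  match st.2 with
  | some s => st.1 ++ [((s : Int), (cols : Int) - 1)]
  | none => st.1

-- ===== PRECONDITION & SPEC =====
-- Pre_ excludes exactly the grids on which Python A raises IndexError: some column c of the
-- first row reaches, in column-major order with the early break, a row shorter than c+1
-- (both Pythons raise at the same cell there).
def Pre_find_problem_segments (grid : List (List String)) : Prop :=
  ∀ c ∈ List.range (if grid.length ≠ 0 then (grid.headD []).length else 0),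
    ∀ r ∈ List.range grid.length,
      c < (grid.getD r []).length ∨
        ∃ r' ∈ List.range r, c < (grid.getD r' []).length ∧ (grid.getD r' []).getD c " " ≠ " "
instance (grid : List (List String)) : Decidable (Pre_find_problem_segments grid) := by
  unfold Pre_find_problem_segments; infer_instance

def pvWitness_find_problem_segments : List (List String) :=
  [[" ", "x", " ", "y"], ["z", " ", " ", "w"]]

def Spec_find_problem_segments (grid : List (List String)) (out : List (Int × Int)) : Prop := out = find_problem_segments_alt grid
instance (grid : List (List String)) (out : List (Int × Int)) : Decidable (Spec_find_problem_segments grid out) := by unfold Spec_find_problem_segments; infer_instance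

-- ===== CLAIM (what is proved, stated in full; the proofs are below) =====
def Claim_equal_find_problem_segments : Prop := ∀ (grid : List (List String)), Dom_find_problem_segments grid → Pre_find_problem_segments grid → Spec_find_problem_segments grid (find_problem_segments grid)

-- ===== LEMMAS AND PROOFS =====

-- pvWhileA is defined by well-founded recursion; its three equations, for rewriting
theorem pvWhileA_nil (c : Nat) : pvWhileA [] c = [] := by rw [pvWhileA]

theorem pvWhileA_true (rest : List Bool) (c : Nat) :
    pvWhileA (true :: rest) c = pvWhileA rest (c + 1) := by rw [pvWhileA]

theorem pvWhileA_false (rest : List Bool) (c : Nat) :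
    pvWhileA (false :: rest) c =
      ((c : Int), ((pvSkipA rest (c + 1)).1 : Int) - 1) ::
        pvWhileA (pvSkipA rest (c + 1)).2 (pvSkipA rest (c + 1)).1 := by rw [pvWhileA]

-- the two blank tests agree (A over row indices, B over the rows themselves)
theorem pvBlank_eq (grid : List (List String)) (c : Nat) :
    ∀ n k, grid.length = k + n →
      pvBlankA grid c (List.range' k n) = pvBlankB c (grid.drop k) := by
  intro n
  induction n with
  | zero =>
      intro k h
      rw [List.drop_of_length_le (by omega)]
      simp [pvBlankA, pvBlankB]
  | succ m ih =>
      intro k h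
      have hk : k < grid.length := by omega
      rw [List.range'_succ, List.drop_eq_getElem_cons hk]
      have hget : grid.getD k [] = grid[k] := List.getD_eq_getElem grid [] hk
      simp only [pvBlankA, pvBlankB, hget, ih (k + 1) (by omega)]
      by_cases hcell : grid[k][c]?.getD " " = " " <;> simp [hcell]
-- B's fold over an index range, in recursive form, starting from state st
def pvRunB (grid : List (List String)) : Nat → Nat → (List (Int × Int) × Option Nat) → List (Int × Int) × Option Nat
  | _, 0, st => st
  | k, n + 1, st => pvRunB grid (k + 1) n (pvStepB grid st k)

theorem pvRunB_eq_foldl (grid : List (List String)) :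
    ∀ n k st, (List.range' k n).foldl (pvStepB grid) st = pvRunB grid k n st := by
  intro n
  induction n with
  | zero => intro k st; simp [pvRunB]
  | succ m ih => intro k st; simp [List.range'_succ, pvRunB, ih]

def pvFinish (st : List (Int × Int) × Option Nat) (n : Nat) : List (Int × Int) :=
  match st.2 with
  | some s => st.1 ++ [((s : Int), (n : Int) - 1)]
  | none => st.1

def pvBlanks (grid : List (List String)) (c n : Nat) : List Bool :=
  (List.range' c n).map (fun k => pvBlankB k grid)

-- core invariant: B's single pass, from a closed state, produces A's grouping of the blank
-- list; from an open state with start s, it produces A's inner skip loop followed by the rest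
theorem pvMain (grid : List (List String)) :
    ∀ (n c : Nat) (segs : List (Int × Int)),
      (pvFinish (pvRunB grid c n (segs, none)) (c + n) =
        segs ++ pvWhileA (pvBlanks grid c n) c) ∧
      (∀ s : Nat, pvFinish (pvRunB grid c n (segs, some s)) (c + n) =
        segs ++ ((s : Int), ((pvSkipA (pvBlanks grid c n) c).1 : Int) - 1) ::
          pvWhileA (pvSkipA (pvBlanks grid c n) c).2 (pvSkipA (pvBlanks grid c n) c).1) := by
  intro n
  induction n with
  | zero =>
      intro c segs
      constructor
      · simp [pvRunB, pvFinish, pvBlanks, pvWhileA_nil]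
      · intro s; simp [pvRunB, pvFinish, pvBlanks, pvSkipA, pvWhileA_nil]
  | succ m ih =>
      intro c segs
      have hbl : pvBlanks grid c (m + 1) = pvBlankB c grid :: pvBlanks grid (c + 1) m := by
        simp [pvBlanks, List.range'_succ]
      have harith : c + (m + 1) = (c + 1) + m := by omega
      by_cases hb : pvBlankB c grid = true
      · rw [hbl, hb]
        constructor
        · have h1 : pvRunB grid c (m + 1) (segs, none) = pvRunB grid (c + 1) m (segs, none) := by
            simp [pvRunB, pvStepB, hb]
          rw [h1, harith, (ih (c + 1) segs).1, pvWhileA_true]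
        · intro s
          have h1 : pvRunB grid c (m + 1) (segs, some s) =
              pvRunB grid (c + 1) m (segs ++ [((s : Int), (c : Int) - 1)], none) := by
            simp [pvRunB, pvStepB, hb]
          rw [h1, harith, (ih (c + 1) (segs ++ [((s : Int), (c : Int) - 1)])).1]
          rw [show pvSkipA (true :: pvBlanks grid (c + 1) m) c = (c, true :: pvBlanks grid (c + 1) m) from rfl]
          rw [pvWhileA_true]
          simp
      · have hb' : pvBlankB c grid = false := by simpa using hb
        rw [hbl, hb']
        constructor
        · have h1 : pvRunB grid c (m + 1) (segs, none) = pvRunB grid (c + 1) m (segs, some c) := by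
            simp [pvRunB, pvStepB, hb']
          rw [h1, harith, (ih (c + 1) segs).2 c, pvWhileA_false]
        · intro s
          have h1 : pvRunB grid c (m + 1) (segs, some s) = pvRunB grid (c + 1) m (segs, some s) := by
            simp [pvRunB, pvStepB, hb']
          rw [h1, harith, (ih (c + 1) segs).2 s]
          rfl

-- ===== VERDICT (by name: the statement is the Claim_ definition above) =====
theorem find_problem_segments_spec : Claim_equal_find_problem_segments := by
  intro grid _ _
  unfold Spec_find_problem_segments
  show pvWhileA ((List.range (if grid.length ≠ 0 then (grid.headD []).length else 0)).map
        (fun c => pvBlankA grid c (List.range grid.length))) 0 =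
      pvFinish ((List.range (if grid ≠ [] then (grid.headD []).length else 0)).foldl
        (pvStepB grid) ([], none)) (if grid ≠ [] then (grid.headD []).length else 0)
  have hcols : (if grid ≠ [] then (grid.headD []).length else 0) =
      (if grid.length ≠ 0 then (grid.headD []).length else 0) := by
    cases grid <;> simp
  rw [hcols]
  set cols := if grid.length ≠ 0 then (grid.headD []).length else 0 with hc
  simp only [List.range_eq_range']
  rw [pvRunB_eq_foldl]
  have hmap : (List.range' 0 cols).map (fun c => pvBlankA grid c (List.range' 0 grid.length)) =
      pvBlanks grid 0 cols := by
    unfold pvBlanks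
    refine List.map_congr_left ?_
    intro c _
    rw [pvBlank_eq grid c grid.length 0 (by omega)]
    simp
  rw [hmap]
  have h := (pvMain grid cols 0 []).1
  simp only [Nat.zero_add] at h
  rw [h]
  simp
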